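-- pv_equiv track=rewrite | github.com/RazorBold/Decoder_Lansitec_CAT1 | decode.py | decode_parameter_command
-- ===== SOURCE A (Python) =====
-- def decode_parameter_command(param_type, param_value):
--     """Decode parameter command based on type"""
--     param_types = {
--         '01': {
--             'name': 'Heartbeat Period',
--             'format': lambda x: f'{int(x, 16)} minutes'
--         },
--         '05': {
--             'name': 'BLE Receiving Duration',
--             'format': lambda x: f'{int(x, 16)}s'
--         },
--         '06': {
--             'name': 'GNSS Receiving Duration',
--             'format': lambda x: f'{int(x, 16)}s'
--         },
--         '0A': {
--             'name': 'Bluetooth Position Beacon UUID Filter',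
--             'format': lambda x: '-'.join([x[i:i+2] for i in range(0, len(x), 2)])
--         }
--     }
--
--     if param_type in param_types:
--         param_info = param_types[param_type]
--         return {
--             'Parameter': param_info['name'],
--             'Value': param_value,
--             'Description': param_info['format'](param_value)
--         }
--     return {
--         'Parameter': f'Unknown (Type: {param_type})',
--         'Value': param_value,
--         'Description': 'Unknown parameter type'
--     }
-- ===== SOURCE B (Python) =====
-- def _dash_pairs(s):
--     if len(s) <= 2:
--         return s
--     return s[:2] + '-' + _dash_pairs(s[2:])
--
--
-- def decode_parameter_command(param_type, param_value):
--     if param_type == '01':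
--         name, desc = 'Heartbeat Period', f'{int(param_value, 16)} minutes'
--     elif param_type == '05':
--         name, desc = 'BLE Receiving Duration', f'{int(param_value, 16)}s'
--     elif param_type == '06':
--         name, desc = 'GNSS Receiving Duration', f'{int(param_value, 16)}s'
--     elif param_type == '0A':
--         name, desc = 'Bluetooth Position Beacon UUID Filter', _dash_pairs(param_value)
--     else:
--         name, desc = f'Unknown (Type: {param_type})', 'Unknown parameter type'
--     return {'Parameter': name, 'Value': param_value, 'Description': desc}
-- ===== Notes on version B (the rewrite author's own statement) =====
-- stated objective: simpler
-- what changed: Replaced the dict-of-lambdas lookup table with a plain if/elif ladder, and the range-indexed slice comprehension for the UUID hyphenation with a direct recursion that peels two characters at a time.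
import Mathlib
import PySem

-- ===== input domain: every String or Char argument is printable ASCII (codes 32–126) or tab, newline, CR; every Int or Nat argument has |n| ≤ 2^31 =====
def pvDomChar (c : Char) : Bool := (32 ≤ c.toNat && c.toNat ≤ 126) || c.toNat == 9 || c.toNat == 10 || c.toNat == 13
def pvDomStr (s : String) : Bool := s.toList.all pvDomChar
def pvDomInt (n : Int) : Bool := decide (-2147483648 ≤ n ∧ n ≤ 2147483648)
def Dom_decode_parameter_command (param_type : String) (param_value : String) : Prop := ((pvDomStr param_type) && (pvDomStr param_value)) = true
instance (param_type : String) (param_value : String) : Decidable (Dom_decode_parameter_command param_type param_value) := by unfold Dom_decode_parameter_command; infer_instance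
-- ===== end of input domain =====

-- B replaces A's dict-of-lambdas lookup table with a plain if/elif ladder and hyphenates the
-- UUID by direct two-characters-at-a-time recursion instead of a range-indexed slice
-- comprehension (objective: simpler).

-- ===== PORT A =====
-- the 'format' lambdas of A's table; Option models the ValueError that int(x, 16) may raise
def pvFmtHex (suffix : String) (x : String) : Option String :=
  (PySem.Int.ofStrBase? x 16).map (fun n => PySem.Int.toStr n ++ suffix)

def pvFmtUUID (x : String) : Option String :=
  some (PySem.Str.join "-" ((PySem.List.pyRange 0 (PySem.Str.len x) 2).map
    (fun i => PySem.Str.slice x (some i) (some (i + 2)))))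

-- A's local dict literal 'param_types'
def pvParamTypes : PySem.Dict String (String × (String → Option String)) :=
  PySem.Dict.ofList
    [("01", ("Heartbeat Period", pvFmtHex " minutes")),
     ("05", ("BLE Receiving Duration", pvFmtHex "s")),
     ("06", ("GNSS Receiving Duration", pvFmtHex "s")),
     ("0A", ("Bluetooth Position Beacon UUID Filter", pvFmtUUID))]

def decode_parameter_command (param_type : String) (param_value : String) : List (String × String) :=
  match PySem.Dict.get? pvParamTypes param_type with
  | some param_info =>
    match param_info.2 param_value with
    | some desc =>
      [("Parameter", param_info.1), ("Value", param_value), ("Description", desc)]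
    | none => []  -- int(x, 16) raised ValueError; excluded by Pre_
  | none =>
    [("Parameter", "Unknown (Type: " ++ param_type ++ ")"), ("Value", param_value),
     ("Description", "Unknown parameter type")]

-- ===== PORT B =====
-- _dash_pairs of Source B, transliterated on the code points of the string
def pvDashPairs (s : List Char) : List Char :=
  if s.length ≤ 2 then s
  else s.take 2 ++ '-' :: pvDashPairs (s.drop 2)
termination_by s.length
decreasing_by simp; omega

def decode_parameter_command_alt (param_type : String) (param_value : String) : List (String × String) :=
  let nd? : Option (String × String) :=
    if param_type = "01" then
      (PySem.Int.ofStrBase? param_value 16).map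
        (fun n => ("Heartbeat Period", PySem.Int.toStr n ++ " minutes"))
    else if param_type = "05" then
      (PySem.Int.ofStrBase? param_value 16).map
        (fun n => ("BLE Receiving Duration", PySem.Int.toStr n ++ "s"))
    else if param_type = "06" then
      (PySem.Int.ofStrBase? param_value 16).map
        (fun n => ("GNSS Receiving Duration", PySem.Int.toStr n ++ "s"))
    else if param_type = "0A" then
      some ("Bluetooth Position Beacon UUID Filter", String.ofList (pvDashPairs param_value.toList))
    else
      some ("Unknown (Type: " ++ param_type ++ ")", "Unknown parameter type")
  match nd? with
  | some (name, desc) => [("Parameter", name), ("Value", param_value), ("Description", desc)]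
  | none => []  -- int(param_value, 16) raised ValueError; excluded by Pre_

-- ===== PRECONDITION & SPEC =====
-- Pre_ excludes exactly the inputs on which A raises: param_type '01'/'05'/'06' with a
-- param_value that int(x, 16) rejects (ValueError).
def Pre_decode_parameter_command (param_type : String) (param_value : String) : Prop :=
  (param_type = "01" ∨ param_type = "05" ∨ param_type = "06") →
    (PySem.Int.ofStrBase? param_value 16).isSome = true

instance (param_type : String) (param_value : String) : Decidable (Pre_decode_parameter_command param_type param_value) := by
  unfold Pre_decode_parameter_command; infer_instance

def pvWitness_decode_parameter_command : String × String := ("01", "1A")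

def Spec_decode_parameter_command (param_type : String) (param_value : String) (out : List (String × String)) : Prop := out = decode_parameter_command_alt param_type param_value
instance (param_type : String) (param_value : String) (out : List (String × String)) : Decidable (Spec_decode_parameter_command param_type param_value out) := by unfold Spec_decode_parameter_command; infer_instance

-- ===== CLAIM (what is proved, stated in full; the proofs are below) =====
def Claim_equal_decode_parameter_command : Prop := ∀ (param_type : String) (param_value : String), Dom_decode_parameter_command param_type param_value → Pre_decode_parameter_command param_type param_value → Spec_decode_parameter_command param_type param_value (decode_parameter_command param_type param_value)

-- ===== LEMMAS AND PROOFS =====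

theorem pvParamTypes_items : pvParamTypes.items =
    [("01", ("Heartbeat Period", pvFmtHex " minutes")),
     ("05", ("BLE Receiving Duration", pvFmtHex "s")),
     ("06", ("GNSS Receiving Duration", pvFmtHex "s")),
     ("0A", ("Bluetooth Position Beacon UUID Filter", pvFmtUUID))] := rfl

theorem get_none (pt : String) (h1 : ¬ pt = "01") (h5 : ¬ pt = "05") (h6 : ¬ pt = "06") (hA : ¬ pt = "0A") :
    PySem.Dict.get? pvParamTypes pt = none := by
  have e1 : (("01" : String) == pt) = false := by simp [Ne.symm h1]
  have e5 : (("05" : String) == pt) = false := by simp [Ne.symm h5]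
  have e6 : (("06" : String) == pt) = false := by simp [Ne.symm h6]
  have eA : (("0A" : String) == pt) = false := by simp [Ne.symm hA]
  simp [PySem.Dict.get?, pvParamTypes_items, List.find?, e1, e5, e6, eA]

theorem get_01 : PySem.Dict.get? pvParamTypes "01" = some ("Heartbeat Period", pvFmtHex " minutes") := rfl
theorem get_05 : PySem.Dict.get? pvParamTypes "05" = some ("BLE Receiving Duration", pvFmtHex "s") := rfl
theorem get_06 : PySem.Dict.get? pvParamTypes "06" = some ("GNSS Receiving Duration", pvFmtHex "s") := rfl
theorem get_0A : PySem.Dict.get? pvParamTypes "0A" = some ("Bluetooth Position Beacon UUID Filter", pvFmtUUID) := rfl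

theorem join_cons_of_ne_nil (sep p : List Char) (l : List (List Char)) (h : l ≠ []) :
    PySem.Chars.join sep (p :: l) = p ++ sep ++ PySem.Chars.join sep l := by
  cases l with
  | nil => exact absurd rfl h
  | cons q r => exact PySem.Chars.join_cons_cons sep p q r

-- A's join-of-slices comprehension equals B's two-at-a-time recursion, at the char-list level
theorem join_slices_eq_dashPairs (cs : List Char) :
    PySem.Chars.join ['-']
      ((List.range ((cs.length + 1) / 2)).map (fun k => (cs.drop (2 * k)).take 2))
      = pvDashPairs cs := by
  induction cs using pvDashPairs.induct with
  | case1 s hle =>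
    rw [pvDashPairs, if_pos hle]
    cases s with
    | nil => simp [PySem.Chars.join_nil]
    | cons a t =>
      have h2 : (((a :: t).length + 1) / 2) = 1 := by simp at hle ⊢; omega
      rw [h2]
      simp [List.range_one, PySem.Chars.join_singleton, List.take_of_length_le hle]
  | case2 s hgt ih =>
    rw [pvDashPairs, if_neg hgt]
    have hm : ((s.length + 1) / 2) = ((s.drop 2).length + 1) / 2 + 1 := by
      simp at hgt ⊢; omega
    rw [hm, List.range_succ_eq_map, List.map_cons]
    have htail : (List.map (fun k => (s.drop (2 * k)).take 2) (List.map Nat.succ (List.range (((s.drop 2).length + 1) / 2))))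
        = (List.range (((s.drop 2).length + 1) / 2)).map (fun k => ((s.drop 2).drop (2 * k)).take 2) := by
      rw [List.map_map]
      refine List.map_congr_left ?_
      intro k _
      simp [List.drop_drop]
      ring_nf
    rw [htail]
    have hne : (List.range (((s.drop 2).length + 1) / 2)).map (fun k => ((s.drop 2).drop (2 * k)).take 2) ≠ [] := by
      simp at hgt ⊢
      omega
    rw [join_cons_of_ne_nil _ _ _ hne, ih]
    simp

-- the whole '0A' description: A's Str-level expression equals B's
set_option maxHeartbeats 2000000 in
theorem uuid_eq (pv : String) :
    PySem.Str.join "-" (List.map (fun i => PySem.Str.slice pv (some i) (some (i + 2)))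
      (PySem.List.pyRange 0 (pv.length : Int) 2))
      = String.ofList (pvDashPairs pv.toList) := by
  have hself : ∀ s : String, s = String.ofList s.toList := by intro s; simp
  rw [hself (PySem.Str.join _ _)]
  congr 1
  rw [PySem.Str.toList_join]
  rw [show ("-" : String).toList = ['-'] from by decide, List.map_map]
  rw [show ((fun s : String => s.toList) ∘ fun i => PySem.Str.slice pv (some i) (some (i + 2)))
      = fun i => PySem.List.slice pv.toList (some i) (some (i + 2)) from by funext i; simp]
  rw [show ((pv.length : Nat) : Int) = (pv.toList.length : Int) from by simp]
  rw [PySem.List.pyRange_of_pos 0 (pv.toList.length : Int) (by norm_num), List.map_map]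
  rw [show (if (0:Int) < (pv.toList.length : Int) then ((((pv.toList.length : Int)) - 0 + 2 - 1) / 2).toNat else 0)
      = (pv.toList.length + 1) / 2 from by split_ifs <;> omega]
  rw [← join_slices_eq_dashPairs pv.toList]
  congr 1
  refine List.map_congr_left ?_
  intro k _
  show PySem.List.slice pv.toList (some (0 + 2 * (k:Int))) (some (0 + 2 * (k:Int) + 2)) = _
  rw [show (0 + 2 * (k:Int)) = ((2*k : Nat) : Int) from by push_cast; ring,
      show ((2*k : Nat) : Int) + 2 = ((2*k : Nat) : Int) + ((2:Nat) : Int) from by norm_num,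
      PySem.List.slice_natCast_add]

-- ===== VERDICT (by name: the statement is the Claim_ definition above) =====
set_option maxHeartbeats 2000000 in
theorem decode_parameter_command_spec : Claim_equal_decode_parameter_command := by
  intro pt pv _ hpre
  unfold Spec_decode_parameter_command
  by_cases h1 : pt = "01"
  · subst h1
    obtain ⟨n, hn⟩ := Option.isSome_iff_exists.mp (hpre (Or.inl rfl))
    simp [decode_parameter_command, decode_parameter_command_alt, get_01, pvFmtHex, hn]
  · by_cases h5 : pt = "05"
    · subst h5
      obtain ⟨n, hn⟩ := Option.isSome_iff_exists.mp (hpre (Or.inr (Or.inl rfl)))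
      simp [decode_parameter_command, decode_parameter_command_alt, get_05, pvFmtHex, hn]
    · by_cases h6 : pt = "06"
      · subst h6
        obtain ⟨n, hn⟩ := Option.isSome_iff_exists.mp (hpre (Or.inr (Or.inr rfl)))
        simp [decode_parameter_command, decode_parameter_command_alt, get_06, pvFmtHex, hn]
      · by_cases hA : pt = "0A"
        · subst hA
          simp [decode_parameter_command, decode_parameter_command_alt, get_0A, pvFmtUUID,
            h1, h5, h6]
          exact uuid_eq pv
        · simp [decode_parameter_command, decode_parameter_command_alt,
            get_none pt h1 h5 h6 hA, h1, h5, h6, hA]
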